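-- pv_equiv track=rewrite | github.com/tomohiro1221/mushikuizan | mul.py | get_full_row_int
-- ===== SOURCE A (Python) =====
-- def get_full_row_int(row, row_env):
--     """
--     Args:
--         row: a list of characters consisting of '0', '1', ... '9', or 'x'
--         row_env: environment that substitutes 'x' in row
--
--     Returns:
--         the largest available integer available in the row with row_env applied.
--
--     Raises:
--         ValueError: if 'x' in row is not supplemented by row_env and unknown
--     """
--     a = 0
--     for i, c in enumerate(row):
--         a *= 10
--         if c == 'x':
--             if row_env[i] is not None:
--                 a += row_env[i]
--             else:
--                 raise ValueError("Evaluating a row with an incomplete environment.")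
--         else:
--             a += int(c)
--     return a
-- ===== SOURCE B (Python) =====
-- def get_full_row_int(row, row_env):
--     # Stage 1: resolve each cell to its integer value (env lookup for 'x', int() otherwise).
--     vals = [row_env[i] if c == 'x' else int(c) for i, c in enumerate(row)]
--     if any(v is None for v in vals):
--         raise ValueError("Evaluating a row with an incomplete environment.")
--     # Stage 2: explicit place-value sum.
--     n = len(vals)
--     return sum(v * 10 ** (n - 1 - i) for i, v in enumerate(vals))
-- ===== Notes on version B (the rewrite author's own statement) =====
-- stated objective: alternative
-- what changed: Splits A's fused Horner loop (a = a*10 + value, resolving each cell as it goes) into two staged passes: first a comprehension resolving every cell to its integer value, then an explicit place-value sum of v*10**(n-1-i) over the resolved list.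
import Mathlib
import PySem

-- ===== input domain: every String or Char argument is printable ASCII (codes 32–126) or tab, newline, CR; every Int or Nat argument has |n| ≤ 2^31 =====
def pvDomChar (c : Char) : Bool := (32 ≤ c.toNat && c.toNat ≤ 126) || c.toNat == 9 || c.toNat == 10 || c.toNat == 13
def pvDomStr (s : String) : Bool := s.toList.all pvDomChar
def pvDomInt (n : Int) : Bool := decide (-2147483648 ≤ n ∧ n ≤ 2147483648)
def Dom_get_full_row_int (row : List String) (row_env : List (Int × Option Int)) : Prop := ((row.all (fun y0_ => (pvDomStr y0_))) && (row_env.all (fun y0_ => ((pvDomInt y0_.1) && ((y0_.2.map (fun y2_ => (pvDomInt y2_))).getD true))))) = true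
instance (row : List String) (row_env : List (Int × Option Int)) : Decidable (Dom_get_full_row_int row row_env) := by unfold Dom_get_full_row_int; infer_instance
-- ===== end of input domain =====

-- B replaces A's fused Horner loop by two staged passes: resolve every cell to its
-- integer value first, then take an explicit place-value sum v * 10^(n-1-i)
-- (alternative decomposition, same cost).

-- ===== PORT A =====
-- loop of A: fold over enumerate(row) with accumulator a; none = the ValueError /
-- KeyError Python raises (excluded by Pre_).
def pvGoA (env : List (Int × Option Int)) : List (Int × String) → Int → Option Int
  | [], a => some a
  | (i, c) :: rest, a =>
    let a' := a * 10
    if c = "x" then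
      match (PySem.Dict.mk env).get? i with
      | some (some v) => pvGoA env rest (a' + v)
      | some none => none      -- row_env[i] is None : ValueError
      | none => none           -- KeyError
    else
      match PySem.Int.ofStr? c with
      | some v => pvGoA env rest (a' + v)   -- a += int(c)
      | none => none           -- int(c) : ValueError

def get_full_row_int (row : List String) (row_env : List (Int × Option Int)) : Int :=
  (pvGoA row_env (PySem.List.enumerate row) 0).getD 0

-- ===== PORT B =====
-- stage 1 of B: the comprehension resolving each cell; none = a raise (excluded by Pre_:
-- a 'None'/missing env entry or a non-int cell).
def pvValsB (env : List (Int × Option Int)) (l : List (Int × String)) : Option (List Int) :=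
  l.mapM (fun p =>
    if p.2 = "x" then ((PySem.Dict.mk env).get? p.1).join else PySem.Int.ofStr? p.2)

def get_full_row_int_alt (row : List String) (row_env : List (Int × Option Int)) : Int :=
  match pvValsB row_env (PySem.List.enumerate row) with
  | none => 0
  | some vals =>
    -- stage 2 of B: sum(v * 10 ** (n - 1 - i)); the exponent n-1-i is ≥ 0 for every
    -- position, so .toNat is exact here.
    ((PySem.List.enumerate vals).map
      (fun p => p.2 * 10 ^ (((vals.length : Int) - 1) - p.1).toNat)).sum

-- ===== PRECONDITION & SPEC =====
-- Pre_ = exactly the inputs on which Python A returns: every 'x' position has a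
-- non-None binding in row_env, and every other cell parses as an int.
def Pre_get_full_row_int (row : List String) (row_env : List (Int × Option Int)) : Prop :=
  ∀ p ∈ PySem.List.enumerate row,
    if p.2 = "x" then (((PySem.Dict.mk row_env).get? p.1).join).isSome = true
    else (PySem.Int.ofStr? p.2).isSome = true
instance (row : List String) (row_env : List (Int × Option Int)) : Decidable (Pre_get_full_row_int row row_env) := by unfold Pre_get_full_row_int; infer_instance

def pvWitness_get_full_row_int : List String × (List (Int × Option Int)) :=
  (["1", "x", "3"], [((1 : Int), some 5)])

def Spec_get_full_row_int (row : List String) (row_env : List (Int × Option Int)) (out : Int) : Prop := out = get_full_row_int_alt row row_env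
instance (row : List String) (row_env : List (Int × Option Int)) (out : Int) : Decidable (Spec_get_full_row_int row row_env out) := by unfold Spec_get_full_row_int; infer_instance

-- ===== CLAIM (what is proved, stated in full; the proofs are below) =====
def Claim_equal_get_full_row_int : Prop := ∀ (row : List String) (row_env : List (Int × Option Int)), Dom_get_full_row_int row row_env → Pre_get_full_row_int row row_env → Spec_get_full_row_int row row_env (get_full_row_int row row_env)

-- ===== LEMMAS AND PROOFS =====

-- value substituted at one position (proof-side characterisation shared by both programs)
def pvVal (env : List (Int × Option Int)) (p : Int × String) : Option Int :=
  if p.2 = "x" then ((PySem.Dict.mk env).get? p.1).join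
  else PySem.Int.ofStr? p.2

def pvVals (env : List (Int × Option Int)) : List (Int × String) → Option (List Int)
  | [] => some []
  | p :: rest =>
    match pvVal env p, pvVals env rest with
    | some v, some vs => some (v :: vs)
    | _, _ => none

-- little-endian polynomial evaluation at 10
def pvPoly : List Int → Int
  | [] => 0
  | v :: vs => v + 10 * pvPoly vs

theorem pvValsB_eq (env : List (Int × Option Int)) :
    ∀ l : List (Int × String), pvValsB env l = pvVals env l := by
  intro l
  induction l with
  | nil => rfl
  | cons p rest ih =>
    simp only [pvValsB, List.mapM_cons, pvVals] at *
    rw [ih]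
    show (pvVal env p).bind _ = _
    cases pvVal env p <;> cases pvVals env rest <;> simp [Option.bind]

theorem pvGoA_eq (env : List (Int × Option Int)) :
    ∀ (l : List (Int × String)) (a : Int),
      pvGoA env l a = (pvVals env l).map (fun vs => vs.foldl (fun s v => s * 10 + v) a) := by
  intro l
  induction l with
  | nil => intro a; rfl
  | cons p rest ih =>
    intro a
    obtain ⟨i, c⟩ := p
    by_cases hc : c = "x"
    · simp only [pvGoA, pvVals, pvVal, hc]
      cases h : (PySem.Dict.mk env).get? i with
      | none => simp
      | some o =>
        cases o with
        | none => simp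
        | some v =>
          simp only [Option.join]
          simp only [ih]
          cases hv : pvVals env rest <;> simp [List.foldl]
    · simp only [pvGoA, pvVals, pvVal, if_neg hc]
      cases h : PySem.Int.ofStr? c with
      | none => simp
      | some v =>
        simp only [ih]
        cases hv : pvVals env rest <;> simp [List.foldl]

theorem pvPoly_append_single (ws : List Int) (v : Int) :
    pvPoly (ws ++ [v]) = pvPoly ws + v * 10 ^ ws.length := by
  induction ws with
  | nil => simp [pvPoly]
  | cons w ws ih => simp [pvPoly, ih, pow_succ]; ring

theorem pvFoldl_horner (vs : List Int) :
    ∀ a : Int, vs.foldl (fun s v => s * 10 + v) a = a * 10 ^ vs.length + pvPoly vs.reverse := by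
  induction vs with
  | nil => intro a; simp [pvPoly]
  | cons v vs ih =>
    intro a
    simp only [List.foldl_cons, List.reverse_cons, List.length_cons, ih,
      pvPoly_append_single, List.length_reverse, pow_succ]
    ring

-- B's place-value sum over enumerate equals the same polynomial
theorem pvSumPlaces :
    ∀ (vs : List Int) (s M : Int), M = s + vs.length - 1 →
      ((PySem.List.enumerate vs s).map (fun p => p.2 * 10 ^ (M - p.1).toNat)).sum
        = pvPoly vs.reverse := by
  intro vs
  induction vs with
  | nil => intro s M _; simp [PySem.List.enumerate_nil, pvPoly]
  | cons v tl ih =>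
    intro s M hM
    simp only [List.length_cons] at hM
    have hMs : M - s = (tl.length : Int) := by push_cast at hM ⊢; omega
    rw [PySem.List.enumerate_cons]
    simp only [List.map_cons, List.sum_cons]
    rw [ih (s + 1) M (by omega)]
    rw [hMs, Int.toNat_natCast]
    simp only [List.reverse_cons, pvPoly_append_single, List.length_reverse]
    ring

-- ===== VERDICT (by name: the statement is the Claim_ definition above) =====
theorem get_full_row_int_spec : Claim_equal_get_full_row_int := by
  intro row row_env _ _
  unfold Spec_get_full_row_int get_full_row_int get_full_row_int_alt
  rw [pvGoA_eq, pvValsB_eq]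
  cases h : pvVals row_env (PySem.List.enumerate row) with
  | none => rfl
  | some vs =>
    simp only [Option.map_some, Option.getD_some]
    rw [pvFoldl_horner, pvSumPlaces vs 0 ((vs.length : Int) - 1) (by simp)]
    ring
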